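-- pv_equiv track=rewrite | github.com/Corvo-fhy/Coding-assessment | 饿了么第一次/2.py | reorder_B
-- ===== SOURCE A (Python) =====
-- def find_bigger(A_i, sorted_B):
--     left, right = 0, len(sorted_B) - 1
--     while left <= right:
--         mid = (left + right) // 2
--         if sorted_B[mid] <= A_i:
--             left = mid + 1
--         else:
--             right = mid - 1
--     return left  # 返回的是第一个大于A_i的元素的位置
--
-- def reorder_B(A, B):
--     # 对B进行排序
--     sorted_B = sorted(B)
--
--     # 创建一个结果数组用于存储重新排序后的B
--     reordered_B = [None] * len(A)
--
--     # 对A的每个元素进行处理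
--     for i in range(len(A)):
--         idx = find_bigger(A[i], sorted_B)
--
--         # 如果找到了比A[i]大的元素
--         if idx < len(sorted_B):
--             reordered_B[i] = sorted_B[idx]
--             # 从sorted_B中移除该元素
--             sorted_B.pop(idx)
--         else:
--             # 如果没有找到大于A[i]的元素，选择B中剩余的最小元素
--             reordered_B[i] = sorted_B.pop(0)
--
--     return reordered_B
-- ===== SOURCE B (Python) =====
-- def reorder_B(A, B):
--     # For each a in A: take the first remaining (sorted) value > a, else the smallest remaining.
--     rest = sorted(B)
--     out = []
--     for a in A:
--         k = 0
--         while k < len(rest) and rest[k] <= a: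
--             k += 1
--         out.append(rest.pop(k if k < len(rest) else 0))
--     return out
-- ===== Notes on version B (the rewrite author's own statement) =====
-- stated objective: simpler
-- what changed: Replaces the hand-written binary search over the sorted pool and the None-prefilled result array by a direct linear scan for the leading run of elements <= a, popping the chosen element in place and appending to the output.
import Mathlib
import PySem

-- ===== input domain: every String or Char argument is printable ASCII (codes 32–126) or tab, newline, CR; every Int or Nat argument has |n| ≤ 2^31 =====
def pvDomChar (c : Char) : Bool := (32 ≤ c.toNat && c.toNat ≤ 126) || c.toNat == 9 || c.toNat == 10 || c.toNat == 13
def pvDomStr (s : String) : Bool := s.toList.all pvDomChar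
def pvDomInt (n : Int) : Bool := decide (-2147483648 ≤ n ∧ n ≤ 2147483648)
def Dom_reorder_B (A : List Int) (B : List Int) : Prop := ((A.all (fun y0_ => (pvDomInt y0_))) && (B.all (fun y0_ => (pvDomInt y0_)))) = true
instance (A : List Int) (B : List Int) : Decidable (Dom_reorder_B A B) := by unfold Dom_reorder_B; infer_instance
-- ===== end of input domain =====

-- B replaces A's hand-written binary search + None-prefilled result array by a direct
-- linear scan for the leading run of elements ≤ a (objective: simpler; no speed claim).


-- ===== PORT A =====
-- while left <= right: mid = (left+right)//2; if sorted_B[mid] <= A_i: left = mid+1 else right = mid-1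
def find_bigger_go (Ai : Int) (s : List Int) (left right : Int) : Int :=
  if _h : left ≤ right then
    let mid := PySem.Int.floordiv (left + right) 2
    match PySem.List.pyGet? s mid with
    | some v =>
        if v ≤ Ai then find_bigger_go Ai s (mid + 1) right
        else find_bigger_go Ai s left (mid - 1)
    | none => left  -- unreachable from find_bigger: 0 ≤ left ≤ mid ≤ right < len(s)
  else left
termination_by (right + 1 - left).toNat
decreasing_by
  all_goals
    have hb := PySem.Int.floordiv_two_mid_bounds _h
    omega

def find_bigger (Ai : Int) (sorted_B : List Int) : Int :=
  find_bigger_go Ai sorted_B 0 ((sorted_B.length : Int) - 1)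

-- reordered_B = [None]*len(A) is written at index i as i runs 0..len(A)-1 (A[i] is the only
-- use of i), transcribed as an append-accumulator folded over the elements of A.
def reorder_B (A : List Int) (B : List Int) : List Int :=
  (A.foldl (fun (st : List Int × List Int) a =>
      let sB := st.1
      let idx := find_bigger a sB
      if idx < (sB.length : Int) then
        match PySem.List.pop? sB idx with
        | some (v, sB') => (sB', st.2 ++ [v])
        | none => st  -- unreachable: 0 ≤ idx < len(sB)
      else
        match PySem.List.pop? sB 0 with
        | some (v, sB') => (sB', st.2 ++ [v])
        | none => st  -- sorted_B empty: Python raises IndexError, outside Pre_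
    ) (PySem.List.sorted B (fun x => x) false, [])).2

-- ===== PORT B =====
-- k = 0; while k < len(rest) and rest[k] <= a: k += 1
def scanLe (a : Int) : List Int → Nat
  | [] => 0
  | x :: xs => if x ≤ a then scanLe a xs + 1 else 0

def reorder_B_alt_go (rest : List Int) : List Int → List Int
  | [] => []
  | a :: As =>
    let k := scanLe a rest
    let j : Int := if k < rest.length then (k : Int) else 0
    match PySem.List.pop? rest j with
    | some (v, rest') => v :: reorder_B_alt_go rest' As
    | none => []  -- rest empty: Python raises IndexError, outside Pre_

def reorder_B_alt (A : List Int) (B : List Int) : List Int :=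
  reorder_B_alt_go (PySem.List.sorted B (fun x => x) false) A

-- ===== PRECONDITION & SPEC =====
-- Both programs raise IndexError (pop from an exhausted pool) exactly when len(A) > len(B).
def Pre_reorder_B (A : List Int) (B : List Int) : Prop := A.length ≤ B.length
instance (A : List Int) (B : List Int) : Decidable (Pre_reorder_B A B) := by
  unfold Pre_reorder_B; infer_instance

def pvWitness_reorder_B : List Int × List Int := ([1, 2], [3, 0, 5])

def Spec_reorder_B (A : List Int) (B : List Int) (out : List Int) : Prop := out = reorder_B_alt A B
instance (A : List Int) (B : List Int) (out : List Int) : Decidable (Spec_reorder_B A B out) := by unfold Spec_reorder_B; infer_instance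

-- ===== CLAIM (what is proved, stated in full; the proofs are below) =====
def Claim_equal_reorder_B : Prop := ∀ (A : List Int) (B : List Int), Dom_reorder_B A B → Pre_reorder_B A B → Spec_reorder_B A B (reorder_B A B)

-- ===== LEMMAS AND PROOFS =====

lemma scanLe_le_length (a : Int) (s : List Int) : scanLe a s ≤ s.length := by
  induction s with
  | nil => simp [scanLe]
  | cons x xs ih =>
    by_cases h : x ≤ a
    · simp [scanLe, h]; omega
    · simp [scanLe, h]

lemma scanLe_lt_imp (a : Int) (s : List Int) :
    ∀ i (hi : i < s.length), i < scanLe a s → s[i] ≤ a := by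
  induction s with
  | nil => simp
  | cons x xs ih =>
    intro i hi h
    by_cases hx : x ≤ a
    · cases i with
      | zero => simpa
      | succ n => exact ih n (by simpa using hi) (by simp [scanLe, hx] at h; omega)
    · simp [scanLe, hx] at h

lemma scanLe_stop (a : Int) (s : List Int) (h : scanLe a s < s.length) :
    a < s[scanLe a s] := by
  induction s with
  | nil => simp at h
  | cons x xs ih =>
    by_cases hx : x ≤ a
    · simp only [scanLe, hx, if_true]
      exact ih (by simp [scanLe, hx] at h; omega)
    · simpa [scanLe, hx] using not_le.mp hx

lemma scanLe_ge (a : Int) (s : List Int) (hs : s.Pairwise (· ≤ ·))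
    (k : Nat) (hk : k < s.length) (hka : s[k] ≤ a) : k < scanLe a s := by
  by_contra hcon
  have ht : scanLe a s ≤ k := Nat.le_of_not_lt hcon
  have ht2 : scanLe a s < s.length := lt_of_le_of_lt ht hk
  have hgt := scanLe_stop a s ht2
  rcases Nat.eq_or_lt_of_le ht with heq | hlt
  · subst heq; omega
  · have := (List.pairwise_iff_getElem.mp hs) (scanLe a s) k ht2 hk hlt
    omega

lemma find_bigger_go_eq (a : Int) (s : List Int) (hs : s.Pairwise (· ≤ ·)) :
    ∀ l r : Int, 0 ≤ l → l ≤ (scanLe a s : Int) → (scanLe a s : Int) ≤ r + 1 →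
      r < (s.length : Int) → find_bigger_go a s l r = (scanLe a s : Int) := by
  intro l r
  fun_induction find_bigger_go a s l r with
  | case1 l r hlr mid v hv hva ih =>
    intro h0 hls hsr hr
    have hb := PySem.Int.floordiv_two_mid_bounds hlr
    have hmid : mid = PySem.Int.floordiv (l + r) 2 := rfl
    have h0m : 0 ≤ mid := by omega
    have hml : mid < (s.length : Int) := by omega
    have hvv : v = s[mid.toNat] := by
      have := PySem.List.pyGet?_eq_some_getElem (xs := s) (i := mid) h0m hml
      rw [hv] at this; exact Option.some.inj this
    have hkk : mid.toNat < scanLe a s := by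
      apply scanLe_ge a s hs mid.toNat (by omega) (hvv ▸ hva)
    exact ih (by omega) (by omega) hsr hr
  | case2 l r hlr mid v hv hva ih =>
    intro h0 hls hsr hr
    have hb := PySem.Int.floordiv_two_mid_bounds hlr
    have h0m : 0 ≤ mid := by omega
    have hml : mid < (s.length : Int) := by omega
    have hvv : v = s[mid.toNat] := by
      have := PySem.List.pyGet?_eq_some_getElem (xs := s) (i := mid) h0m hml
      rw [hv] at this; exact Option.some.inj this
    have hkk : scanLe a s ≤ mid.toNat := by
      by_contra hcon
      have := scanLe_lt_imp a s mid.toNat (by omega) (by omega)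
      rw [← hvv] at this; omega
    exact ih h0 hls (by omega) (by omega)
  | case3 l r hlr mid hv =>
    intro h0 hls hsr hr
    have hb := PySem.Int.floordiv_two_mid_bounds hlr
    exfalso
    have : PySem.List.pyGet? s mid ≠ none := by
      have := PySem.List.pyGet?_eq_some_getElem (xs := s) (i := mid) (by omega) (by omega)
      simp [this]
    exact this hv
  | case4 l r hlr =>
    intro h0 hls hsr hr
    omega

lemma find_bigger_eq (a : Int) (s : List Int) (hs : s.Pairwise (· ≤ ·)) :
    find_bigger a s = (scanLe a s : Int) := by
  have h := scanLe_le_length a s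
  exact find_bigger_go_eq a s hs 0 ((s.length : Int) - 1)
    le_rfl (by exact_mod_cast Nat.zero_le _) (by omega) (by omega)

-- one loop step: with a sorted nonempty pool both programs pop the same index
lemma main_loop_eq :
    ∀ (A : List Int) (s acc : List Int), s.Pairwise (· ≤ ·) → A.length ≤ s.length →
      (A.foldl (fun (st : List Int × List Int) a =>
        let sB := st.1
        let idx := find_bigger a sB
        if idx < (sB.length : Int) then
          match PySem.List.pop? sB idx with
          | some (v, sB') => (sB', st.2 ++ [v])
          | none => st
        else
          match PySem.List.pop? sB 0 with
          | some (v, sB') => (sB', st.2 ++ [v])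
          | none => st) (s, acc)).2 = acc ++ reorder_B_alt_go s A := by
  intro A
  induction A with
  | nil => intro s acc _ _; simp [reorder_B_alt_go]
  | cons a As ih =>
    intro s acc hs hlen
    have hsne : 0 < s.length := by simpa using Nat.lt_of_lt_of_le (by simp) hlen
    have hfb := find_bigger_eq a s hs
    set k := scanLe a s with hk
    have hkle := scanLe_le_length a s
    -- the popped index is the same on both sides
    have hj : (if k < s.length then (k : Int) else 0) = if (k : Int) < (s.length : Int) then (k : Int) else 0 := by
      split_ifs with h1 h2 <;> first | rfl | omega
    by_cases hlt : k < s.length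
    · have hpop : PySem.List.pop? s (k : Int) = some (s[k], s.eraseIdx k) :=
        PySem.List.pop?_natCast s k hlt
      have hs' : (s.eraseIdx k).Pairwise (· ≤ ·) := hs.sublist (List.eraseIdx_sublist s k)
      have hlen' : As.length ≤ (s.eraseIdx k).length := by
        rw [List.length_eraseIdx_of_lt hlt]
        have : As.length < s.length := by simpa using hlen
        omega
      simp only [List.foldl_cons, reorder_B_alt_go, hfb, ← hk]
      rw [if_pos (by exact_mod_cast hlt), if_pos hlt, hpop]
      simp only []
      rw [ih (s.eraseIdx k) (acc ++ [s[k]]) hs' hlen']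
      simp
    · -- k = len(s): both pop index 0
      have hk0 : k = s.length := by omega
      obtain ⟨x, xs, rfl⟩ := List.exists_cons_of_ne_nil (List.ne_nil_of_length_pos hsne)
      have hpop : PySem.List.pop? (x :: xs) (0 : Int) = some (x, xs) := PySem.List.pop?_zero_cons x xs
      have hs' : xs.Pairwise (· ≤ ·) := hs.sublist (List.sublist_cons_self x xs)
      have hlen' : As.length ≤ xs.length := by simpa using hlen
      simp only [List.foldl_cons, reorder_B_alt_go, hfb, ← hk]
      rw [if_neg (by exact_mod_cast (by omega : ¬ ((k : Int) < ((x :: xs).length : Int)))), if_neg hlt, hpop]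
      simp only []
      rw [ih xs (acc ++ [x]) hs' hlen']
      simp

-- ===== VERDICT (by name: the statement is the Claim_ definition above) =====
theorem reorder_B_spec : Claim_equal_reorder_B := by
  intro A B _ hpre
  unfold Spec_reorder_B reorder_B reorder_B_alt
  have hs : (PySem.List.sorted B (fun x => x) false).Pairwise (· ≤ ·) :=
    PySem.List.sorted_pairwise B (fun x => x)
  have hlen : A.length ≤ (PySem.List.sorted B (fun x => x) false).length := by
    rw [PySem.List.length_sorted]; exact hpre
  simpa using main_loop_eq A (PySem.List.sorted B (fun x => x) false) [] hs hlen
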